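-- pv_equiv track=rewrite | github.com/duowuyms/MANSY_ImmersiveVideoStreaming | bitrate_selection/utils/common.py | generate_environment_samples
-- ===== SOURCE A (Python) =====
-- import math
--
-- def generate_environment_samples(video_list, user_list, trace_list, qoe_list, seed=0):
--     """
--     Exhaustive training over all possible environments is expensive and unnecessary.
--     So this function samples some environments while making sure that each video/user/trace/qoe will be used at least once
--     """
--     def _sample_ids(_id_list, _list_len, _max_len):
--         _ret = []
--         for _i in range(_max_len):
--             _ret.append(_id_list[_i % _list_len])
--         return _ret
--
--     video_list_len = len(video_list)
--     user_list_len = len(user_list)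
--     trace_list_len = len(trace_list)
--     qoe_list_len = len(qoe_list)
--     max_len = max(video_list_len, user_list_len, trace_list_len, qoe_list_len)
--     total_len = max(max_len, video_list_len * qoe_list_len * math.ceil(max_len / (video_list_len * qoe_list_len)))
--
--     video_ids = _sample_ids(list(range(video_list_len)), video_list_len, total_len)
--     user_ids = _sample_ids(list(range(user_list_len)), user_list_len, total_len)
--     trace_ids = _sample_ids(list(range(trace_list_len)), trace_list_len, total_len)
--     qoe_ids = _sample_ids(list(range(qoe_list_len)), qoe_list_len, total_len)
--
--     environment_samples = list(zip(video_ids, user_ids, trace_ids, qoe_ids))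
--     return environment_samples
-- ===== SOURCE B (Python) =====
-- import math
--
-- def generate_environment_samples(video_list, user_list, trace_list, qoe_list, seed=0):
--     v, u, t, q = len(video_list), len(user_list), len(trace_list), len(qoe_list)
--     max_len = max(v, u, t, q)
--     total_len = max(max_len, v * q * math.ceil(max_len / (v * q)))
--     samples = []
--     a = b = c = d = 0
--     for _ in range(total_len):
--         samples.append((a, b, c, d))
--         a = a + 1 if a + 1 < v else 0
--         b = b + 1 if b + 1 < u else 0
--         c = c + 1 if c + 1 < t else 0
--         d = d + 1 if d + 1 < q else 0
--     return samples
-- ===== Notes on version B (the rewrite author's own statement) =====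
-- stated objective: alternative
-- what changed: Replaces the four index-building loops (each appending id_list[i % len]) plus the final zip with one stateful pass that maintains four wrapping counters (increment, reset to 0 on reaching the list length), emitting each 4-tuple directly with no list indexing, no modulo per element and no intermediate lists.
import Mathlib
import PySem

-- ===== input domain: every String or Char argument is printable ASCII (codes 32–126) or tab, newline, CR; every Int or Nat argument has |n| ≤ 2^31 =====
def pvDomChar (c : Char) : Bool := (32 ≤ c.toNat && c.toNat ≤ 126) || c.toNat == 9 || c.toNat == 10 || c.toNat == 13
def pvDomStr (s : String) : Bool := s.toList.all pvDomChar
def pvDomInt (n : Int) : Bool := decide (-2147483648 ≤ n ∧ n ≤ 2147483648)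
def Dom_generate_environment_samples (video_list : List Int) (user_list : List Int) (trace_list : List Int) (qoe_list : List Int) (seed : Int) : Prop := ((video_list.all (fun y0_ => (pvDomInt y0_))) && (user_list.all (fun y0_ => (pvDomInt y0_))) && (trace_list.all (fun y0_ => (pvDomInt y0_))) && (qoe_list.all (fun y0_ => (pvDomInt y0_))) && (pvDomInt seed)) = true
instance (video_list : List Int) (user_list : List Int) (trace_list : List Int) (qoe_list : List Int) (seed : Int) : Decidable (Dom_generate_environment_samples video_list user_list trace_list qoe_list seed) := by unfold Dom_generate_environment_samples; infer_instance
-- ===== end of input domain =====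

-- B replaces A's four index-building loops + zip by one stateful pass maintaining four
-- wrapping counters (no indexing, no per-element modulo); objective: alternative.
-- The unused `seed` parameter is kept, as in the Python.

-- ===== PORT A =====
-- _sample_ids: appends _id_list[_i % _list_len] for _i in range(_max_len).
-- pyGetD with default 0 is exact here: under Pre_ the index _i % _list_len is always in range.
def pvA_sample_ids (id_list : List Int) (list_len : Int) (max_len : Int) : List Int :=
  (PySem.List.pyRange 0 max_len 1).foldl
    (fun ret i => ret ++ [PySem.List.pyGetD id_list (PySem.Int.mod i list_len) 0]) []

-- math.ceil(max_len / (v*q)) is ported as the integer ceiling -((-max_len) // (v*q)),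
-- exact for list lengths (far below 2^52, where float division is exact enough for ceil).
def generate_environment_samples (video_list : List Int) (user_list : List Int) (trace_list : List Int) (qoe_list : List Int) (seed : Int) : List (Int × Int × Int × Int) :=
  let video_list_len : Int := video_list.length
  let user_list_len : Int := user_list.length
  let trace_list_len : Int := trace_list.length
  let qoe_list_len : Int := qoe_list.length
  let max_len := max (max (max video_list_len user_list_len) trace_list_len) qoe_list_len
  let total_len := max max_len (video_list_len * qoe_list_len *
    (-(PySem.Int.floordiv (-max_len) (video_list_len * qoe_list_len))))
  let video_ids := pvA_sample_ids (PySem.List.pyRange 0 video_list_len 1) video_list_len total_len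
  let user_ids := pvA_sample_ids (PySem.List.pyRange 0 user_list_len 1) user_list_len total_len
  let trace_ids := pvA_sample_ids (PySem.List.pyRange 0 trace_list_len 1) trace_list_len total_len
  let qoe_ids := pvA_sample_ids (PySem.List.pyRange 0 qoe_list_len 1) qoe_list_len total_len
  video_ids.zip (user_ids.zip (trace_ids.zip qoe_ids))

-- ===== PORT B =====
-- B's counted loop 'for _ in range(total_len)' with the four wrapping counters,
-- as structural recursion on the remaining iteration count.
def pvB_loop (v u t q : Int) : Nat → Int → Int → Int → Int → List (Int × Int × Int × Int)
  | 0, _, _, _, _ => []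
  | Nat.succ n, a, b, c, d =>
      (a, b, c, d) :: pvB_loop v u t q n
        (if a + 1 < v then a + 1 else 0)
        (if b + 1 < u then b + 1 else 0)
        (if c + 1 < t then c + 1 else 0)
        (if d + 1 < q then d + 1 else 0)

def generate_environment_samples_alt (video_list : List Int) (user_list : List Int) (trace_list : List Int) (qoe_list : List Int) (seed : Int) : List (Int × Int × Int × Int) :=
  let v : Int := video_list.length
  let u : Int := user_list.length
  let t : Int := trace_list.length
  let q : Int := qoe_list.length
  let max_len := max (max (max v u) t) q
  let total_len := max max_len (v * q * (-(PySem.Int.floordiv (-max_len) (v * q))))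
  pvB_loop v u t q total_len.toNat 0 0 0 0

-- ===== PRECONDITION & SPEC =====
-- Pre_ excludes exactly the inputs where A raises ZeroDivisionError (some list empty:
-- either in math.ceil's divisor video_list_len*qoe_list_len or in `_i % _list_len`).
def Pre_generate_environment_samples (video_list : List Int) (user_list : List Int) (trace_list : List Int) (qoe_list : List Int) (seed : Int) : Prop :=
  video_list ≠ [] ∧ user_list ≠ [] ∧ trace_list ≠ [] ∧ qoe_list ≠ []
instance (video_list : List Int) (user_list : List Int) (trace_list : List Int) (qoe_list : List Int) (seed : Int) : Decidable (Pre_generate_environment_samples video_list user_list trace_list qoe_list seed) := by unfold Pre_generate_environment_samples; infer_instance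

def pvWitness_generate_environment_samples : List Int × List Int × List Int × List Int × Int := ([1, 2], [3], [4, 5, 6], [7], 0)

def Spec_generate_environment_samples (video_list : List Int) (user_list : List Int) (trace_list : List Int) (qoe_list : List Int) (seed : Int) (out : List (Int × Int × Int × Int)) : Prop := out = generate_environment_samples_alt video_list user_list trace_list qoe_list seed
instance (video_list : List Int) (user_list : List Int) (trace_list : List Int) (qoe_list : List Int) (seed : Int) (out : List (Int × Int × Int × Int)) : Decidable (Spec_generate_environment_samples video_list user_list trace_list qoe_list seed out) := by unfold Spec_generate_environment_samples; infer_instance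

-- ===== CLAIM (what is proved, stated in full; the proofs are below) =====
def Claim_equal_generate_environment_samples : Prop := ∀ (video_list : List Int) (user_list : List Int) (trace_list : List Int) (qoe_list : List Int) (seed : Int), Dom_generate_environment_samples video_list user_list trace_list qoe_list seed → Pre_generate_environment_samples video_list user_list trace_list qoe_list seed → Spec_generate_environment_samples video_list user_list trace_list qoe_list seed (generate_environment_samples video_list user_list trace_list qoe_list seed)

-- ===== LEMMAS AND PROOFS =====

-- A's sampling loop over range(total) picking range(n)[i % n] is exactly the map of (i % n).
theorem pvA_sample_ids_eq_map (n total : Int) (hn : 0 < n) :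
    pvA_sample_ids (PySem.List.pyRange 0 n 1) n total
      = (PySem.List.pyRange 0 total 1).map (fun i => PySem.Int.mod i n) := by
  unfold pvA_sample_ids
  rw [PySem.List.foldl_append_singleton_eq_map]
  refine List.map_congr_left (fun i _ => ?_)
  have h0 := PySem.Int.mod_nonneg i hn
  have h1 := PySem.Int.mod_lt i hn
  rw [show PySem.List.pyRange 0 n 1 = (PySem.List.pyRange 0 n 1).map id from
        (List.map_id _).symm,
      PySem.List.pyGetD_map_pyRange_of_nonneg id n _ 0 h0 h1]
  rfl

-- Counter wrap step: incrementing i % v with reset at v is (i+1) % v.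
theorem pv_wrap_emod (i v : Int) (hv : 0 < v) :
    (if i % v + 1 < v then i % v + 1 else 0) = (i + 1) % v := by
  have h0 := Int.emod_nonneg i (by omega : v ≠ 0)
  have h1 := Int.emod_lt_of_pos i hv
  have e := Int.emod_add_mul_ediv i v
  have key : (i + 1) % v = (i % v + 1) % v := by
    rw [show i + 1 = (i % v + 1) + v * (i / v) by linarith]
    exact Int.add_mul_emod_self_left _ _ _
  by_cases h : i % v + 1 < v
  · rw [if_pos h, key, Int.emod_eq_of_lt (by omega) h]
  · rw [if_neg h, key, show i % v + 1 = v by omega, Int.emod_self]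

-- B's counter loop started at the residues of i produces the modulus map over range(i, i+n).
theorem pvB_loop_eq_map (v u t q : Int) (hv : 0 < v) (hu : 0 < u) (ht : 0 < t) (hq : 0 < q)
    (n : Nat) (i : Int) :
    pvB_loop v u t q n (i % v) (i % u) (i % t) (i % q)
      = (PySem.List.pyRange i (i + n) 1).map
          (fun j => (PySem.Int.mod j v, PySem.Int.mod j u, PySem.Int.mod j t, PySem.Int.mod j q)) := by
  induction n generalizing i with
  | zero =>
    rw [PySem.List.pyRange_one_eq_nil (by simp)]
    simp [pvB_loop]
  | succ n ih =>
    rw [PySem.List.pyRange_one_cons (by omega : i < i + (n + 1 : Nat))]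
    rw [List.map_cons]
    show pvB_loop v u t q (n + 1) (i % v) (i % u) (i % t) (i % q) = _
    rw [pvB_loop, pv_wrap_emod i v hv, pv_wrap_emod i u hu, pv_wrap_emod i t ht,
        pv_wrap_emod i q hq, ih (i + 1)]
    have harg : i + 1 + (n : Int) = i + ((n : Nat) + 1 : Nat) := by push_cast; ring
    rw [harg]
    congr 1
    simp [PySem.Int.mod_eq_emod_of_pos hv, PySem.Int.mod_eq_emod_of_pos hu,
      PySem.Int.mod_eq_emod_of_pos ht, PySem.Int.mod_eq_emod_of_pos hq]

theorem generate_environment_samples_spec : Claim_equal_generate_environment_samples := by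
  intro video_list user_list trace_list qoe_list seed _ hpre
  obtain ⟨hv, hu, ht, hq⟩ := hpre
  unfold Spec_generate_environment_samples generate_environment_samples generate_environment_samples_alt
  have hv' : 0 < (video_list.length : Int) := by
    simpa using Int.natCast_pos.mpr (List.length_pos_iff.mpr hv)
  have hu' : 0 < (user_list.length : Int) := by
    simpa using Int.natCast_pos.mpr (List.length_pos_iff.mpr hu)
  have ht' : 0 < (trace_list.length : Int) := by
    simpa using Int.natCast_pos.mpr (List.length_pos_iff.mpr ht)
  have hq' : 0 < (qoe_list.length : Int) := by
    simpa using Int.natCast_pos.mpr (List.length_pos_iff.mpr hq)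
  set v : Int := (video_list.length : Int)
  set u : Int := (user_list.length : Int)
  set t : Int := (trace_list.length : Int)
  set q : Int := (qoe_list.length : Int)
  set m := max (max (max v u) t) q with hm
  set total := max m (v * q * (-(PySem.Int.floordiv (-m) (v * q)))) with htot
  have htotnn : 0 ≤ total := le_trans (by omega : (0:Int) ≤ v) (le_trans (by simp [hm]) (le_max_left _ _))
  have hcast : ((total.toNat : Int)) = total := Int.toNat_of_nonneg htotnn
  have hB := pvB_loop_eq_map v u t q hv' hu' ht' hq' total.toNat 0
  simp only [Int.zero_emod, zero_add, hcast] at hB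
  rw [hB]
  simp only [pvA_sample_ids_eq_map _ _ hv', pvA_sample_ids_eq_map _ _ hu',
    pvA_sample_ids_eq_map _ _ ht', pvA_sample_ids_eq_map _ _ hq',
    List.zip_map']
  rfl
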